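-- pv_equiv track=rewrite | github.com/safiAchraf/leetcoding | graphs.py | maxsizeIsland
-- ===== SOURCE A (Python) =====
-- def maxsizeIsland(grid):
--     visited = set()
--     def helper(i,j):
--         if i<0 or j<0 or i>=len(grid) or j>=len(grid[0]) or grid[i][j] == '0' or (i,j) in visited:
--             return 0
--
--         visited.add((i,j))
--         return 1+helper(i+1,j)+helper(i-1,j)+helper(i,j+1)+helper(i,j-1)
--     count = 0
--     for i in range(len(grid)):
--         for j in range(len(grid[0])):
--             if grid[i][j]=='1' and (i,j) not in visited:
--                 count = max(count,helper(i,j))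
--     return count
-- ===== SOURCE B (Python) =====
-- def maxsizeIsland(grid):
--     rows = len(grid)
--     cols = len(grid[0]) if grid else 0
--     visited = set()
--     count = 0
--     for i in range(rows):
--         for j in range(cols):
--             if grid[i][j] == '1' and (i, j) not in visited:
--                 size = 0
--                 stack = [(i, j)]
--                 while stack:
--                     x, y = stack.pop()
--                     if (0 <= x < rows and 0 <= y < cols
--                             and grid[x][y] != '0' and (x, y) not in visited):
--                         visited.add((x, y))
--                         size += 1
--                         stack.append((x, y - 1))
--                         stack.append((x, y + 1))
--                         stack.append((x - 1, y))
--                         stack.append((x + 1, y))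
--                 count = max(count, size)
--     return count
-- ===== Notes on version B (the rewrite author's own statement) =====
-- stated objective: alternative
-- what changed: A's recursive flood fill through a closure mutating a shared visited set is replaced by an iterative DFS with an explicit stack (mark-at-pop, running size counter); same double loop over cells, but the component traversal is a loop over a worklist instead of 4-way recursion.
import Mathlib
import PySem

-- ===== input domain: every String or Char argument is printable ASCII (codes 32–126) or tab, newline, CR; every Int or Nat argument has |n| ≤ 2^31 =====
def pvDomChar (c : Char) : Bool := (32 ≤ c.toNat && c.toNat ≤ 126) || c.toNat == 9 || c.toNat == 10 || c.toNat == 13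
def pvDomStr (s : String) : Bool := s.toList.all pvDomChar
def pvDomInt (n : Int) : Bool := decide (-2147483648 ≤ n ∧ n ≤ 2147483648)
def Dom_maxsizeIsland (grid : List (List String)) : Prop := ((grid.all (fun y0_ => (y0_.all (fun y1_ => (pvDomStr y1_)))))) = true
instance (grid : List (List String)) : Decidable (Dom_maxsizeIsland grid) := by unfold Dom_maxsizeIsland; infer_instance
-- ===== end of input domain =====

-- B replaces A's recursive flood fill (shared mutable visited set) by an iterative
-- DFS with an explicit stack; same return value, different decomposition (objective: alternative).

-- ===== PORT A =====

-- grid[i][j] for 0 ≤ i < len(grid), 0 ≤ j < len(grid[i]) (exact there; both Pythons index only there under Pre_)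
def cellAt (grid : List (List String)) (i j : Int) : String :=
  (PySem.List.pyGet? ((PySem.List.pyGet? grid i).getD []) j).getD ""

-- A's recursive helper; `fuel` only makes the recursion total (the call site's fuel is always enough, see helperA_fueled)
def helperA (grid : List (List String)) (fuel : Nat) (i j : Int)
    (visited : PySem.Set (Int × Int)) : Int × PySem.Set (Int × Int) :=
  match fuel with
  | 0 => (0, visited)
  | fuel + 1 =>
    if i < 0 ∨ j < 0 ∨ i ≥ (grid.length : Int) ∨ j ≥ ((grid.headD []).length : Int) ∨
        cellAt grid i j = "0" ∨ (i, j) ∈ visited then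
      (0, visited)
    else
      let v0 := PySem.Set.add visited (i, j)
      let r1 := helperA grid fuel (i + 1) j v0
      let r2 := helperA grid fuel (i - 1) j r1.2
      let r3 := helperA grid fuel i (j + 1) r2.2
      let r4 := helperA grid fuel i (j - 1) r3.2
      (1 + r1.1 + r2.1 + r3.1 + r4.1, r4.2)

def maxsizeIsland (grid : List (List String)) : Int :=
  -- len(grid[0]) is only evaluated by Python when grid is nonempty; headD is exact there
  let fuel : Nat := grid.length * (grid.headD []).length + 1
  let st := (PySem.List.pyRange 0 (grid.length : Int) 1).foldl (fun st i =>
      (PySem.List.pyRange 0 ((grid.headD []).length : Int) 1).foldl (fun st j =>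
        if cellAt grid i j = "1" ∧ (i, j) ∉ st.2 then
          let r := helperA grid fuel i j st.2
          (max st.1 r.1, r.2)
        else st) st) ((0 : Int), ([] : PySem.Set (Int × Int)))
  st.1

-- ===== PORT B =====

-- all in-bounds coordinates, and the count of not-yet-visited ones (termination measure for the DFS loop)
def allCells (grid : List (List String)) : List (Int × Int) :=
  (PySem.List.pyRange 0 (grid.length : Int) 1).flatMap
    (fun i => (PySem.List.pyRange 0 ((grid.headD []).length : Int) 1).map (fun j => (i, j)))

def unvis (grid : List (List String)) (visited : PySem.Set (Int × Int)) : Nat :=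
  ((allCells grid).filter (fun q => decide (q ∉ visited))).length

theorem mem_allCells (grid : List (List String)) (x y : Int) :
    (x, y) ∈ allCells grid ↔
      0 ≤ x ∧ x < (grid.length : Int) ∧ 0 ≤ y ∧ y < ((grid.headD []).length : Int) := by
  simp [allCells, PySem.List.mem_pyRange_one]
  tauto

theorem nodup_pyRange_one (a b : Int) : (PySem.List.pyRange a b 1).Nodup := by
  rw [PySem.List.pyRange_one]
  refine List.Nodup.map ?_ (List.nodup_range)
  intro k1 k2 h
  simp at h
  exact h

theorem nodup_allCells (grid : List (List String)) : (allCells grid).Nodup := by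
  rw [allCells, List.nodup_flatMap]
  constructor
  · intro x _
    exact List.Nodup.map (by intro a b h; simpa using h) (nodup_pyRange_one _ _)
  · refine List.Pairwise.imp ?_ (nodup_pyRange_one 0 (grid.length : Int))
    intro a b hne p hp hq
    simp at hp hq
    obtain ⟨j, hj, rfl⟩ := hp
    obtain ⟨j', hj', hq⟩ := hq
    exact hne (congrArg Prod.fst hq).symm

theorem filter_unvis_add (p : Int × Int) (V : PySem.Set (Int × Int)) (hv : p ∉ V) :
    ∀ l : List (Int × Int), l.Nodup → p ∈ l →
      (l.filter (fun q => decide (q ∉ PySem.Set.add V p))).length + 1 =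
      (l.filter (fun q => decide (q ∉ V))).length := by
  intro l
  induction l with
  | nil => intro _ hp; cases hp
  | cons a t ih =>
    intro hnd hp
    have key : ∀ q : Int × Int, q ≠ p →
        (decide (q ∉ PySem.Set.add V p) = decide (q ∉ V)) := by
      intro q hq
      simp [PySem.Set.mem_add, hq]
    by_cases hap : a = p
    · subst hap
      have hat : a ∉ t := (List.nodup_cons.mp hnd).1
      have heq : t.filter (fun q => decide (q ∉ PySem.Set.add V a)) =
          t.filter (fun q => decide (q ∉ V)) :=
        List.filter_congr (fun q hq => key q (fun h => hat (h ▸ hq)))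
      have h1 : (decide (a ∉ PySem.Set.add V a)) = false := by
        simp [PySem.Set.mem_add]
      have h2 : (decide (a ∉ V)) = true := by simpa using hv
      rw [List.filter_cons, List.filter_cons, h1, h2, heq]
      simp
    · have hpt : p ∈ t := by
        rcases List.mem_cons.mp hp with h | h
        · exact absurd h.symm hap
        · exact h
      have hrec := ih (List.nodup_cons.mp hnd).2 hpt
      rw [List.filter_cons, List.filter_cons, key a hap]
      split_ifs
      · simp only [List.length_cons]; omega
      · exact hrec

theorem unvis_add (grid : List (List String)) (V : PySem.Set (Int × Int)) (x y : Int)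
    (hm : (x, y) ∈ allCells grid) (hv : (x, y) ∉ V) :
    unvis grid (PySem.Set.add V (x, y)) + 1 = unvis grid V :=
  filter_unvis_add (x, y) V hv (allCells grid) (nodup_allCells grid) hm

-- the iterative DFS loop of Source B; head of the list = top of the Python stack
def dfsLoop (grid : List (List String)) (stack : List (Int × Int))
    (visited : PySem.Set (Int × Int)) (size : Int) : Int × PySem.Set (Int × Int) :=
  match stack with
  | [] => (size, visited)
  | (x, y) :: rest =>
    if 0 ≤ x ∧ x < (grid.length : Int) ∧ 0 ≤ y ∧ y < ((grid.headD []).length : Int) ∧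
        cellAt grid x y ≠ "0" ∧ (x, y) ∉ visited then
      dfsLoop grid ((x + 1, y) :: (x - 1, y) :: (x, y + 1) :: (x, y - 1) :: rest)
        (PySem.Set.add visited (x, y)) (size + 1)
    else
      dfsLoop grid rest visited size
  termination_by stack.length + 5 * unvis grid visited
  decreasing_by
    all_goals simp
    rename_i h
    have hm : (x, y) ∈ allCells grid := by
      rw [mem_allCells]; exact ⟨h.1, h.2.1, h.2.2.1, h.2.2.2.1⟩
    have := unvis_add grid visited x y hm h.2.2.2.2.2
    omega

def maxsizeIsland_alt (grid : List (List String)) : Int :=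
  let cols : Int := if grid.isEmpty then 0 else ((grid.headD []).length : Int)
  let st := (PySem.List.pyRange 0 (grid.length : Int) 1).foldl (fun st i =>
      (PySem.List.pyRange 0 cols 1).foldl (fun st j =>
        if cellAt grid i j = "1" ∧ (i, j) ∉ st.2 then
          let r := dfsLoop grid [(i, j)] st.2 0
          (max st.1 r.1, r.2)
        else st) st) ((0 : Int), ([] : PySem.Set (Int × Int)))
  st.1

-- ===== PRECONDITION & SPEC =====
-- Pre_ excludes exactly the ragged grids on which Python A raises IndexError
-- (some row shorter than row 0, whose length is used as the column count).
def Pre_maxsizeIsland (grid : List (List String)) : Prop :=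
  ∀ row ∈ grid, (grid.headD []).length ≤ row.length
instance (grid : List (List String)) : Decidable (Pre_maxsizeIsland grid) := by
  unfold Pre_maxsizeIsland; infer_instance
def pvWitness_maxsizeIsland : List (List String) := [["1", "1", "0"], ["0", "1", "0"], ["1", "0", "1"]]

def Spec_maxsizeIsland (grid : List (List String)) (out : Int) : Prop := out = maxsizeIsland_alt grid
instance (grid : List (List String)) (out : Int) : Decidable (Spec_maxsizeIsland grid out) := by
  unfold Spec_maxsizeIsland; infer_instance

-- ===== CLAIM (what is proved, stated in full; the proofs are below) =====
def Claim_equal_maxsizeIsland : Prop := ∀ (grid : List (List String)), Dom_maxsizeIsland grid → Pre_maxsizeIsland grid → Spec_maxsizeIsland grid (maxsizeIsland grid)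

-- ===== LEMMAS AND PROOFS =====

-- visited only grows
theorem helperA_mono (grid : List (List String)) (fuel : Nat) :
    ∀ (i j : Int) (V : PySem.Set (Int × Int)) (p : Int × Int),
      p ∈ V → p ∈ (helperA grid fuel i j V).2 := by
  induction fuel with
  | zero => intro i j V p hp; simpa [helperA] using hp
  | succ f ih =>
    intro i j V p hp
    simp only [helperA]
    split
    · exact hp
    · exact ih _ _ _ _ (ih _ _ _ _ (ih _ _ _ _ (ih _ _ _ _
        ((PySem.Set.mem_add V _ p).mpr (Or.inl hp)))))

theorem unvis_le_of_subset (grid : List (List String)) (V W : PySem.Set (Int × Int))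
    (h : ∀ p, p ∈ V → p ∈ W) : unvis grid W ≤ unvis grid V := by
  unfold unvis
  rw [← List.countP_eq_length_filter, ← List.countP_eq_length_filter]
  refine List.countP_mono_left ?_
  intro x _ hx
  simp only [decide_eq_true_eq] at hx ⊢
  exact fun hxV => hx (h x hxV)

-- any two sufficient fuels agree
theorem helperA_stable (grid : List (List String)) :
    ∀ (n f g : Nat) (i j : Int) (V : PySem.Set (Int × Int)),
      unvis grid V = n → n < f → n < g →
      helperA grid f i j V = helperA grid g i j V := by
  intro n
  induction n using Nat.strong_induction_on with
  | _ n ih =>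
    intro f g i j V hn hf hg
    match f, g with
    | f + 1, g + 1 =>
      simp only [helperA]
      split
      · rfl
      · rename_i hbad
        push Not at hbad
        obtain ⟨h1, h3, h2, h4, _, hv⟩ := hbad
        have hm : (i, j) ∈ allCells grid := by
          rw [mem_allCells]
          exact ⟨by omega, by omega, by omega, by omega⟩
        have hstep := unvis_add grid V i j hm hv
        rw [hn] at hstep
        have e1 : helperA grid f (i + 1) j (PySem.Set.add V (i, j)) =
            helperA grid g (i + 1) j (PySem.Set.add V (i, j)) :=
          ih _ (by omega) f g _ _ _ rfl (by omega) (by omega)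
        rw [e1]
        have s1 : unvis grid (helperA grid g (i + 1) j (PySem.Set.add V (i, j))).2 ≤
            unvis grid (PySem.Set.add V (i, j)) :=
          unvis_le_of_subset grid _ _ (fun p hp => helperA_mono grid g _ _ _ p hp)
        have e2 : helperA grid f (i - 1) j (helperA grid g (i + 1) j (PySem.Set.add V (i, j))).2 =
            helperA grid g (i - 1) j (helperA grid g (i + 1) j (PySem.Set.add V (i, j))).2 :=
          ih _ (by omega) f g _ _ _ rfl (by omega) (by omega)
        rw [e2]
        have s2 : unvis grid (helperA grid g (i - 1) j
              (helperA grid g (i + 1) j (PySem.Set.add V (i, j))).2).2 ≤ _ :=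
          unvis_le_of_subset grid _ _ (fun p hp => helperA_mono grid g _ _ _ p hp)
        have e3 : helperA grid f i (j + 1) (helperA grid g (i - 1) j
              (helperA grid g (i + 1) j (PySem.Set.add V (i, j))).2).2 =
            helperA grid g i (j + 1) (helperA grid g (i - 1) j
              (helperA grid g (i + 1) j (PySem.Set.add V (i, j))).2).2 :=
          ih _ (by omega) f g _ _ _ rfl (by omega) (by omega)
        rw [e3]
        have s3 : unvis grid (helperA grid g i (j + 1) (helperA grid g (i - 1) j
              (helperA grid g (i + 1) j (PySem.Set.add V (i, j))).2).2).2 ≤ _ :=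
          unvis_le_of_subset grid _ _ (fun p hp => helperA_mono grid g _ _ _ p hp)
        have e4 : helperA grid f i (j - 1) (helperA grid g i (j + 1) (helperA grid g (i - 1) j
              (helperA grid g (i + 1) j (PySem.Set.add V (i, j))).2).2).2 =
            helperA grid g i (j - 1) (helperA grid g i (j + 1) (helperA grid g (i - 1) j
              (helperA grid g (i + 1) j (PySem.Set.add V (i, j))).2).2).2 :=
          ih _ (by omega) f g _ _ _ rfl (by omega) (by omega)
        rw [e4]

-- the "true" helper: helperA with any sufficient fuel
def helperT (grid : List (List String)) (i j : Int) (V : PySem.Set (Int × Int)) :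
    Int × PySem.Set (Int × Int) :=
  helperA grid (unvis grid V + 1) i j V

theorem helperT_eq (grid : List (List String)) (i j : Int) (V : PySem.Set (Int × Int)) :
    helperT grid i j V =
      if i < 0 ∨ j < 0 ∨ i ≥ (grid.length : Int) ∨ j ≥ ((grid.headD []).length : Int) ∨
          cellAt grid i j = "0" ∨ (i, j) ∈ V then
        (0, V)
      else
        let v0 := PySem.Set.add V (i, j)
        let r1 := helperT grid (i + 1) j v0
        let r2 := helperT grid (i - 1) j r1.2
        let r3 := helperT grid i (j + 1) r2.2
        let r4 := helperT grid i (j - 1) r3.2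
        (1 + r1.1 + r2.1 + r3.1 + r4.1, r4.2) := by
  change helperA grid (unvis grid V + 1) i j V = _
  rw [helperA]
  by_cases hbad : (i < 0 ∨ j < 0 ∨ i ≥ (grid.length : Int) ∨ j ≥ ((grid.headD []).length : Int) ∨
      cellAt grid i j = "0" ∨ (i, j) ∈ V)
  · rw [if_pos hbad, if_pos hbad]
  · rw [if_neg hbad, if_neg hbad]
    dsimp only
    have hbad' := hbad
    push Not at hbad'
    obtain ⟨h1, h2, h3, h4, _, hv⟩ := hbad'
    have hm : (i, j) ∈ allCells grid := by
      rw [mem_allCells]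
      exact ⟨by omega, by omega, by omega, by omega⟩
    have hstep := unvis_add grid V i j hm hv
    set v0 := PySem.Set.add V (i, j) with hv0
    have e1 : helperA grid (unvis grid V) (i + 1) j v0 = helperT grid (i + 1) j v0 :=
      helperA_stable grid (unvis grid v0) _ _ _ _ _ rfl (by omega) (by omega)
    rw [e1]
    set r1 := helperT grid (i + 1) j v0 with hr1
    have s1 : unvis grid r1.2 ≤ unvis grid v0 := by
      rw [hr1]
      exact unvis_le_of_subset grid _ _ (fun p hp => helperA_mono grid _ _ _ _ p hp)
    have e2 : helperA grid (unvis grid V) (i - 1) j r1.2 = helperT grid (i - 1) j r1.2 :=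
      helperA_stable grid (unvis grid r1.2) _ _ _ _ _ rfl (by omega) (by omega)
    rw [e2]
    set r2 := helperT grid (i - 1) j r1.2 with hr2
    have s2 : unvis grid r2.2 ≤ unvis grid r1.2 := by
      rw [hr2]
      exact unvis_le_of_subset grid _ _ (fun p hp => helperA_mono grid _ _ _ _ p hp)
    have e3 : helperA grid (unvis grid V) i (j + 1) r2.2 = helperT grid i (j + 1) r2.2 :=
      helperA_stable grid (unvis grid r2.2) _ _ _ _ _ rfl (by omega) (by omega)
    rw [e3]
    set r3 := helperT grid i (j + 1) r2.2 with hr3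
    have s3 : unvis grid r3.2 ≤ unvis grid r2.2 := by
      rw [hr3]
      exact unvis_le_of_subset grid _ _ (fun p hp => helperA_mono grid _ _ _ _ p hp)
    have e4 : helperA grid (unvis grid V) i (j - 1) r3.2 = helperT grid i (j - 1) r3.2 :=
      helperA_stable grid (unvis grid r3.2) _ _ _ _ _ rfl (by omega) (by omega)
    rw [e4]

-- sequential processing of a work list by A's helper
def runTodo (grid : List (List String)) : List (Int × Int) → PySem.Set (Int × Int) → Int →
    Int × PySem.Set (Int × Int)
  | [], V, c => (c, V)
  | p :: rest, V, c =>
    let r := helperT grid p.1 p.2 V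
    runTodo grid rest r.2 (c + r.1)

-- B's stack loop is A's recursion linearised
theorem dfsLoop_eq_runTodo (grid : List (List String)) :
    ∀ (stack : List (Int × Int)) (V : PySem.Set (Int × Int)) (c : Int),
      dfsLoop grid stack V c = runTodo grid stack V c := by
  intro stack V c
  induction stack, V, c using dfsLoop.induct grid with
  | case1 V c => rw [dfsLoop, runTodo]
  | case2 V c x y rest h ih =>
    obtain ⟨hx0, hxr, hy0, hyc, hcell, hvv⟩ := h
    rw [dfsLoop, if_pos ⟨hx0, hxr, hy0, hyc, hcell, hvv⟩, ih]
    conv_rhs => rw [runTodo]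
    have hnb : ¬(x < 0 ∨ y < 0 ∨ x ≥ (grid.length : Int) ∨ y ≥ ((grid.headD []).length : Int) ∨
        cellAt grid x y = "0" ∨ (x, y) ∈ V) := by
      push Not
      exact ⟨by omega, by omega, by omega, by omega, hcell, hvv⟩
    conv_rhs => rw [helperT_eq, if_neg hnb]
    rw [runTodo, runTodo, runTodo, runTodo]
    dsimp only
    congr 1
    omega
  | case3 V c x y rest h ih =>
    rw [dfsLoop, if_neg h, ih]
    have hb : (x < 0 ∨ y < 0 ∨ x ≥ (grid.length : Int) ∨ y ≥ ((grid.headD []).length : Int) ∨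
        cellAt grid x y = "0" ∨ (x, y) ∈ V) := by
      by_contra hnb
      push Not at hnb
      exact h ⟨by omega, by omega, by omega, by omega, hnb.2.2.2.2.1, hnb.2.2.2.2.2⟩
    conv_rhs => rw [runTodo, helperT_eq, if_pos hb]
    dsimp only
    rw [add_zero]

-- ===== VERDICT (by name: the statement is the Claim_ definition above) =====
theorem allCells_length (grid : List (List String)) :
    (allCells grid).length = grid.length * (grid.headD []).length := by
  simp [allCells, List.length_flatMap, PySem.List.length_pyRange_one, List.map_const',
    List.sum_replicate, smul_eq_mul]

theorem maxsizeIsland_spec : Claim_equal_maxsizeIsland := by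
  intro grid _ _
  unfold Spec_maxsizeIsland maxsizeIsland maxsizeIsland_alt
  have hcols : (if grid.isEmpty then (0 : Int) else ((grid.headD []).length : Int)) =
      ((grid.headD []).length : Int) := by
    cases grid <;> simp
  dsimp only
  rw [hcols]
  suffices h : ((PySem.List.pyRange 0 (grid.length : Int) 1).foldl (fun st i =>
      (PySem.List.pyRange 0 ((grid.headD []).length : Int) 1).foldl (fun st j =>
        if cellAt grid i j = "1" ∧ (i, j) ∉ st.2 then
          let r := helperA grid (grid.length * (grid.headD []).length + 1) i j st.2
          (max st.1 r.1, r.2)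
        else st) st) ((0 : Int), ([] : PySem.Set (Int × Int)))) =
      ((PySem.List.pyRange 0 (grid.length : Int) 1).foldl (fun st i =>
      (PySem.List.pyRange 0 ((grid.headD []).length : Int) 1).foldl (fun st j =>
        if cellAt grid i j = "1" ∧ (i, j) ∉ st.2 then
          let r := dfsLoop grid [(i, j)] st.2 0
          (max st.1 r.1, r.2)
        else st) st) ((0 : Int), ([] : PySem.Set (Int × Int)))) by
    rw [h]
  refine List.foldl_ext _ _ _ ?_
  intro st i _
  refine List.foldl_ext _ _ _ ?_
  intro st' j _
  by_cases hc : (cellAt grid i j = "1" ∧ (i, j) ∉ st'.2)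
  · rw [if_pos hc, if_pos hc]
    have hA : helperA grid (grid.length * (grid.headD []).length + 1) i j st'.2 =
        helperT grid i j st'.2 := by
      refine helperA_stable grid (unvis grid st'.2) _ _ _ _ _ rfl ?_ (by omega)
      have h1 : unvis grid st'.2 ≤ (allCells grid).length := List.length_filter_le _ _
      have h2 := allCells_length grid
      omega
    have hB : dfsLoop grid [(i, j)] st'.2 0 =
        ((helperT grid i j st'.2).1, (helperT grid i j st'.2).2) := by
      rw [dfsLoop_eq_runTodo, runTodo, runTodo]
      dsimp only
      rw [zero_add]
    dsimp only
    rw [hA, hB]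
  · rw [if_neg hc, if_neg hc]
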